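-- pv_equiv track=rewrite | github.com/wjurayj/AnytimeReasoner | verl/verl/trainer/ppo/brpo.py | find_all_index
-- ===== SOURCE A (Python) =====
-- def find_all_index(resp):
--     indexes = []
--     i = 0
--     while i < len(resp) - 1:
--         if resp[i] == '\n' and resp[i + 1] == '\n':
--             indexes.append(i)
--             i += 1
--         i += 1
--     return indexes
-- ===== SOURCE B (Python) =====
-- def find_all_index(resp):
--     indexes = []
--     pos = 0
--     for part in resp.split('\n\n')[:-1]:
--         pos += len(part)
--         indexes.append(pos)
--         pos += 2
--     return indexes
-- ===== Notes on version B (the rewrite author's own statement) =====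
-- stated objective: faster
-- what changed: Replaced A's char-by-char index loop with a staged algorithm: split the string on the double-newline separator via the C-level str.split and recover the match positions as prefix sums of the piece lengths.
import Mathlib
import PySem

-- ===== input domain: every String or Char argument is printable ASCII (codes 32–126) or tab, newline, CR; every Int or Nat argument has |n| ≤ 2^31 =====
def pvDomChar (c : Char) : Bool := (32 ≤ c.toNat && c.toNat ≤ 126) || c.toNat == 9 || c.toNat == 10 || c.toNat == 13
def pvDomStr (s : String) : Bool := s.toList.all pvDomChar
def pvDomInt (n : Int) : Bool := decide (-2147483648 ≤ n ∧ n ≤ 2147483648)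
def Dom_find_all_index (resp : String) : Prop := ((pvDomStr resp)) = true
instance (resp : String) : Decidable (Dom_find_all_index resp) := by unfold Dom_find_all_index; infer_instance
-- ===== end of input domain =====

-- B replaces A's char-by-char scan with a staged algorithm: split the string on "\n\n"
-- and recover the match positions as prefix sums of the piece lengths (a timing run measured B faster).

-- ===== PORT A =====
-- the while loop of A: for Nat i, Python's `i < len(resp) - 1` is exactly `i + 1 < len`
def findA_loop (l : List Char) (i : Nat) (acc : List Int) : List Int :=
  if i + 1 < l.length then
    if l[i]? = some '\n' ∧ l[i + 1]? = some '\n' then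
      findA_loop l (i + 2) (acc ++ [(i : Int)])
    else
      findA_loop l (i + 1) acc
  else acc
termination_by l.length - i

def find_all_index (resp : String) : List Int :=
  findA_loop resp.toList 0 []

-- ===== PORT B =====
-- Source B: parts = resp.split('\n\n'); for part in parts[:-1]: pos += len(part); append pos; pos += 2
def find_all_index_alt (resp : String) : List Int :=
  let parts := PySem.Chars.splitOn resp.toList ['\n', '\n']
  ((PySem.List.slice parts none (some (-1))).foldl
    (fun (st : Int × List Int) part =>
      (st.1 + part.length + 2, st.2 ++ [st.1 + part.length])) ((0 : Int), ([] : List Int))).2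

-- ===== PRECONDITION & SPEC =====
def Spec_find_all_index (resp : String) (out : List Int) : Prop := out = find_all_index_alt resp
instance (resp : String) (out : List Int) : Decidable (Spec_find_all_index resp out) := by unfold Spec_find_all_index; infer_instance

-- ===== CLAIM (what is proved, stated in full; the proofs are below) =====
def Claim_equal_find_all_index : Prop := ∀ (resp : String), Dom_find_all_index resp → Spec_find_all_index resp (find_all_index resp)

-- ===== LEMMAS AND PROOFS =====

-- proof-side reference: the first-match recursion both programs follow
def pvParts (l : List Char) : List (List Char) :=
  let j := PySem.Chars.find l ['\n', '\n']
  if hj : j = -1 then [l]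
  else
    have h0 : 0 ≤ j := by
      rcases (Int.lt_or_lt_of_ne hj).symm with h | h
      · omega
      · exact absurd h (by have := PySem.Chars.neg_one_le_find l ['\n', '\n']; omega)
    have hp := (PySem.Chars.find_spec h0).1
    have hlen : j.toNat + 2 ≤ l.length := by
      have := hp.length_le; simp [List.length_drop] at this; omega
    l.take j.toNat :: pvParts (l.drop (j.toNat + 2))
termination_by l.length
decreasing_by simp [List.length_drop]; omega

def pvIdxs (l : List Char) : List Int :=
  let j := PySem.Chars.find l ['\n', '\n']
  if hj : j = -1 then []
  else
    have h0 : 0 ≤ j := by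
      rcases (Int.lt_or_lt_of_ne hj).symm with h | h
      · omega
      · exact absurd h (by have := PySem.Chars.neg_one_le_find l ['\n', '\n']; omega)
    have hp := (PySem.Chars.find_spec h0).1
    have hlen : j.toNat + 2 ≤ l.length := by
      have := hp.length_le; simp [List.length_drop] at this; omega
    j :: (pvIdxs (l.drop (j.toNat + 2))).map (· + (j + 2))
termination_by l.length
decreasing_by simp [List.length_drop]; omega


-- clean unfolding equations for the reference recursions
theorem pvParts_eq (l : List Char) :
    pvParts l = if PySem.Chars.find l ['\n', '\n'] = -1 then [l]
      else l.take (PySem.Chars.find l ['\n', '\n']).toNat ::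
        pvParts (l.drop ((PySem.Chars.find l ['\n', '\n']).toNat + 2)) := by
  rw [pvParts]
  by_cases h : PySem.Chars.find l ['\n', '\n'] = -1
  · simp [h]
  · simp [h]

theorem pvIdxs_eq (l : List Char) :
    pvIdxs l = if PySem.Chars.find l ['\n', '\n'] = -1 then []
      else PySem.Chars.find l ['\n', '\n'] ::
        (pvIdxs (l.drop ((PySem.Chars.find l ['\n', '\n']).toNat + 2))).map
          (· + (PySem.Chars.find l ['\n', '\n'] + 2)) := by
  rw [pvIdxs]
  by_cases h : PySem.Chars.find l ['\n', '\n'] = -1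
  · simp [h]
  · simp [h]

-- basic facts about find
theorem pv_find_nonneg (l : List Char) (hj : PySem.Chars.find l ['\n', '\n'] ≠ -1) :
    0 ≤ PySem.Chars.find l ['\n', '\n'] := by
  have := PySem.Chars.neg_one_le_find l ['\n', '\n']; omega

theorem pv_find_bound (l : List Char) (hj : PySem.Chars.find l ['\n', '\n'] ≠ -1) :
    (PySem.Chars.find l ['\n', '\n']).toNat + 2 ≤ l.length := by
  have h0 := pv_find_nonneg l hj
  have hp := (PySem.Chars.find_spec h0).1
  have := hp.length_le; simp [List.length_drop] at this; omega

-- uniqueness: a first occurrence pins down find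
theorem pv_find_eq (l : List Char) (j : Nat)
    (hp : ['\n', '\n'] <+: l.drop j)
    (hmin : ∀ i, i < j → ¬ ['\n', '\n'] <+: l.drop i) :
    PySem.Chars.find l ['\n', '\n'] = (j : Int) := by
  have hinf : ['\n', '\n'] <:+: l := by
    exact hp.isInfix.trans (List.drop_suffix j l).isInfix
  have hne : PySem.Chars.find l ['\n', '\n'] ≠ -1 :=
    (PySem.Chars.find_ne_neg_one_iff l ['\n', '\n']).mpr hinf
  have h0 := pv_find_nonneg l hne
  obtain ⟨hf, hfmin⟩ := PySem.Chars.find_spec h0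
  set f := PySem.Chars.find l ['\n', '\n']
  by_cases hlt : f.toNat < j
  · exact absurd hf (hmin f.toNat hlt)
  · by_cases hgt : j < f.toNat
    · exact absurd hp (hfmin j hgt)
    · omega

-- stepping a non-matching head character shifts pvParts' head
theorem pvParts_cons (c : Char) (rest : List Char)
    (hnp : ¬ ['\n', '\n'] <+: (c :: rest)) :
    pvParts (c :: rest) = (pvParts rest).modifyHead (c :: ·) := by
  by_cases hj : PySem.Chars.find rest ['\n', '\n'] = -1
  · have hnr : ¬ ['\n', '\n'] <:+: rest :=
      (PySem.Chars.find_eq_neg_one_iff rest ['\n', '\n']).mp hj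
    have hnl : ¬ ['\n', '\n'] <:+: (c :: rest) := by
      intro h
      obtain ⟨j, hjp⟩ := (PySem.Chars.exists_prefix_drop_iff_isIn ['\n', '\n'] (c :: rest)).mpr
        ((PySem.Chars.isIn_iff_infix _ _).mpr h)
      cases j with
      | zero => exact hnp (by simpa using hjp)
      | succ j' =>
        have hpj : ['\n', '\n'] <+: rest.drop j' := by simpa using hjp
        exact hnr (hpj.isInfix.trans (List.drop_suffix j' rest).isInfix)
    rw [pvParts_eq (c :: rest), pvParts_eq rest]
    simp [hj, (PySem.Chars.find_eq_neg_one_iff _ _).mpr hnl]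
  · have h0 := pv_find_nonneg rest hj
    obtain ⟨hp, hmin⟩ := PySem.Chars.find_spec h0
    set f := PySem.Chars.find rest ['\n', '\n'] with hf
    have hl : PySem.Chars.find (c :: rest) ['\n', '\n'] = ((f.toNat + 1 : Nat) : Int) := by
      apply pv_find_eq
      · simpa using hp
      · intro i hi
        cases i with
        | zero => simpa using hnp
        | succ i' =>
          intro hc
          exact hmin i' (by omega) (by simpa using hc)
    have hl' : PySem.Chars.find (c :: rest) ['\n', '\n'] ≠ -1 := by rw [hl]; omega
    rw [pvParts_eq (c :: rest), pvParts_eq rest, if_neg hj, if_neg hl', hl]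
    have ht : ((f.toNat + 1 : Nat) : Int).toNat = f.toNat + 1 := by omega
    rw [ht]
    simp [List.take_succ_cons, List.drop_succ_cons, ← hf]

-- pvParts is never empty
theorem pvParts_ne_nil (l : List Char) : pvParts l ≠ [] := by
  rw [pvParts_eq]
  split <;> simp

-- splitOn.go computed with enough fuel agrees with pvParts
theorem pv_go_eq (fuel : Nat) (l : List Char) (cur : List Char) (acc : List (List Char))
    (hfuel : l.length + 1 ≤ fuel) :
    PySem.Chars.splitOn.go ['\n', '\n'] fuel l cur acc =
      acc.reverse ++ (pvParts l).modifyHead (cur.reverse ++ ·) := by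
  induction fuel generalizing l cur acc with
  | zero => omega
  | succ fuel ih =>
    cases l with
    | nil =>
      rw [PySem.Chars.splitOn.go]
      have : PySem.Chars.find ([] : List Char) ['\n', '\n'] = -1 := by decide
      rw [pvParts_eq]
      simp [this]
      omega
    | cons c rest =>
      rw [PySem.Chars.splitOn.go]
      by_cases hpre : List.isPrefixOf ['\n', '\n'] (c :: rest) = true
      · rw [if_pos hpre]
        have hp : ['\n', '\n'] <+: (c :: rest) := List.isPrefixOf_iff_prefix.mp hpre
        have hfind : PySem.Chars.find (c :: rest) ['\n', '\n'] = (0 : Int) := by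
          have := pv_find_eq (c :: rest) 0 (by simpa using hp) (by omega)
          simpa using this
        have hlen2 : 2 ≤ (c :: rest).length := hp.length_le
        have ihh := ih ((c :: rest).drop 2) [] (cur.reverse :: acc)
          (by simp at *; omega)
        rw [show (['\n', '\n'] : List Char).length = 2 from rfl, ihh]
        have hne : PySem.Chars.find (c :: rest) ['\n', '\n'] ≠ -1 := by rw [hfind]; omega
        rw [pvParts_eq (c :: rest), if_neg hne, hfind]
        have hmod : (pvParts ((c :: rest).drop 2)).modifyHead (([] : List Char).reverse ++ ·) =
            pvParts ((c :: rest).drop 2) := by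
          cases h : pvParts ((c :: rest).drop 2) with
          | nil => rfl
          | cons a t => simp
        rw [hmod]
        cases h2 : pvParts ((c :: rest).drop 2) with
        | nil => exact absurd h2 (pvParts_ne_nil _)
        | cons a t =>
          simp only [List.drop_succ_cons, List.drop_one] at h2
          simp_all
      · rw [if_neg hpre]
        have hnp : ¬ ['\n', '\n'] <+: (c :: rest) := fun h =>
          hpre (List.isPrefixOf_iff_prefix.mpr h)
        have ihh := ih rest (c :: cur) acc (by simp at hfuel ⊢; omega)
        rw [ihh, pvParts_cons c rest hnp]
        cases h2 : pvParts rest with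
        | nil => exact absurd h2 (pvParts_ne_nil _)
        | cons a t => simp_all

theorem pv_splitOn_eq (l : List Char) :
    PySem.Chars.splitOn l ['\n', '\n'] = pvParts l := by
  rw [PySem.Chars.splitOn, pv_go_eq (l.length + 1) l [] [] le_rfl]
  cases h : pvParts l with
  | nil => exact absurd h (pvParts_ne_nil _)
  | cons a t => simp_all

-- B's fold over the pieces produces the offset-shifted index list
theorem pv_fold_eq (l : List Char) (pos : Int) (acc : List Int) :
    (((pvParts l).dropLast).foldl
      (fun (st : Int × List Int) part =>
        (st.1 + part.length + 2, st.2 ++ [st.1 + part.length])) (pos, acc)).2 =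
      acc ++ (pvIdxs l).map (· + pos) := by
  by_cases hj : PySem.Chars.find l ['\n', '\n'] = -1
  · rw [pvParts_eq, pvIdxs_eq]
    simp [hj]
  · have h0 := pv_find_nonneg l hj
    have hb := pv_find_bound l hj
    set j := PySem.Chars.find l ['\n', '\n'] with hjdef
    rw [pvParts_eq, pvIdxs_eq, if_neg hj, if_neg hj]
    have hdl : (l.take j.toNat :: pvParts (l.drop (j.toNat + 2))).dropLast =
        l.take j.toNat :: (pvParts (l.drop (j.toNat + 2))).dropLast := by
      cases h2 : pvParts (l.drop (j.toNat + 2)) with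
      | nil => exact absurd h2 (pvParts_ne_nil _)
      | cons a t => simp
    rw [hdl]
    simp only [List.foldl_cons]
    have hlen : ((l.take j.toNat).length : Int) = j := by
      simp [List.length_take]; omega
    rw [pv_fold_eq (l.drop (j.toNat + 2)) (pos + (l.take j.toNat).length + 2) (acc ++ [pos + (l.take j.toNat).length])]
    rw [hlen]
    simp [List.map_map]
    constructor
    · omega
    · apply List.map_congr_left
      intro x _
      simp
      ring
termination_by l.length
decreasing_by simp [List.length_drop]; omega

-- the termination bound for the reference find-loop
theorem pv_findFrom_bounds (l : List Char) (i : Nat) (hi : i ≤ l.length)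
    (h : PySem.Chars.findFrom l ['\n', '\n'] (i : Int) ≠ -1) :
    i ≤ (PySem.Chars.findFrom l ['\n', '\n'] (i : Int)).toNat ∧
    (PySem.Chars.findFrom l ['\n', '\n'] (i : Int)).toNat + 2 ≤ l.length := by
  obtain ⟨h1, h2, -⟩ := PySem.Chars.findFrom_natCast_spec l ['\n', '\n'] i hi h
  have hlen := h2.length_le
  simp [List.length_drop] at hlen
  exact ⟨by omega, by omega⟩

-- proof-side reference loop: repeated findFrom, as in the first-match recursion
def pvFindRef (l : List Char) (i : Nat) (acc : List Int) : List Int :=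
  if hi : i ≤ l.length then
    let j := PySem.Chars.findFrom l ['\n', '\n'] (i : Int)
    if hj : j = -1 then acc
    else pvFindRef l (j.toNat + 2) (acc ++ [j])
  else acc
termination_by l.length + 1 - i
decreasing_by
  have := pv_findFrom_bounds l i hi hj
  omega

-- ['\n','\n'] is a prefix of l.drop m iff positions m, m+1 hold newlines
theorem prefix_iff_match (l : List Char) (m : Nat) :
    (['\n', '\n'] <+: l.drop m) ↔ (l[m]? = some '\n' ∧ l[m + 1]? = some '\n') := by
  constructor
  · rintro ⟨t, ht⟩
    have h1 : (l.drop m).head? = some '\n' := by rw [← ht]; rfl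
    have h2 : (l.drop m).tail.head? = some '\n' := by rw [← ht]; rfl
    rw [List.head?_drop] at h1
    rw [List.tail_drop, List.head?_drop] at h2
    exact ⟨h1, h2⟩
  · rintro ⟨h1, h2⟩
    rw [← List.head?_drop] at h1
    rw [← List.head?_drop, ← List.tail_drop] at h2
    cases hd : l.drop m with
    | nil => rw [hd] at h1; simp at h1
    | cons a t =>
      rw [hd] at h1 h2
      cases t with
      | nil => simp at h2
      | cons b t' =>
        simp at h1 h2
        subst h1; subst h2
        exact ⟨t', by simp⟩

-- a match at m ≥ i makes ['\n','\n'] an infix of l.drop i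
theorem match_infix (l : List Char) (i m : Nat) (him : i ≤ m)
    (h1 : l[m]? = some '\n') (h2 : l[m + 1]? = some '\n') :
    ['\n', '\n'] <:+: l.drop i := by
  have hp : ['\n', '\n'] <+: l.drop m := (prefix_iff_match l m).mpr ⟨h1, h2⟩
  have hs : l.drop m <:+ l.drop i := by
    have : (l.drop i).drop (m - i) = l.drop m := by
      rw [List.drop_drop]; congr 1; omega
    rw [← this]; exact List.drop_suffix _ _
  exact hp.isInfix.trans hs.isInfix

-- if no match ever occurs at or after i, A's loop adds nothing
theorem findA_loop_no_match (l : List Char) (i : Nat) (acc : List Int)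
    (h : ∀ m, i ≤ m → ¬(l[m]? = some '\n' ∧ l[m + 1]? = some '\n')) :
    findA_loop l i acc = acc := by
  rw [findA_loop]
  by_cases hlt : i + 1 < l.length
  · rw [if_pos hlt, if_neg (h i le_rfl)]
    exact findA_loop_no_match l (i + 1) acc (fun m hm => h m (by omega))
  · rw [if_neg hlt]
termination_by l.length - i

-- A's loop skips from i straight to the first match position j without touching acc
theorem findA_loop_skip (l : List Char) (i j : Nat) (acc : List Int) (hij : i ≤ j)
    (hmin : ∀ m, i ≤ m → m < j → ¬ (['\n', '\n'] <+: l.drop m)) :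
    findA_loop l i acc = findA_loop l j acc := by
  rcases Nat.eq_or_lt_of_le hij with heq | hlt
  · rw [heq]
  · rw [findA_loop]
    have hnm : ¬(l[i]? = some '\n' ∧ l[i + 1]? = some '\n') := by
      intro hc
      exact hmin i le_rfl hlt ((prefix_iff_match l i).mpr hc)
    by_cases hb : i + 1 < l.length
    · rw [if_pos hb, if_neg hnm]
      exact findA_loop_skip l (i + 1) j acc hlt (fun m hm hmj => hmin m (by omega) hmj)
    · rw [if_neg hb]
      have hj' : ∀ m, j ≤ m → ¬(l[m]? = some '\n' ∧ l[m + 1]? = some '\n') := by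
        intro m hm hc
        obtain ⟨hlen, -⟩ := List.getElem?_eq_some_iff.mp hc.2
        omega
      rw [findA_loop_no_match l j acc hj']
termination_by j - i

-- A's loop agrees with the reference find-loop from any start position within the list
theorem loops_eq (l : List Char) (i : Nat) (acc : List Int) (hi : i ≤ l.length) :
    findA_loop l i acc = pvFindRef l i acc := by
  rw [pvFindRef, dif_pos hi]
  by_cases hj : PySem.Chars.findFrom l ['\n', '\n'] (i : Int) = -1
  · rw [dif_pos hj]
    have hni : ¬ ['\n', '\n'] <:+: l.drop i :=
      (PySem.Chars.findFrom_natCast_eq_neg_one_iff l ['\n', '\n'] i hi).mp hj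
    refine findA_loop_no_match l i acc ?_
    intro m hm hc
    exact hni (match_infix l i m hm hc.1 hc.2)
  · rw [dif_neg hj]
    obtain ⟨h1, h2, hmin⟩ := PySem.Chars.findFrom_natCast_spec l ['\n', '\n'] i hi hj
    set j := PySem.Chars.findFrom l ['\n', '\n'] (i : Int) with hjdef
    have hbounds := pv_findFrom_bounds l i hi hj
    obtain ⟨hm1, hm2⟩ := (prefix_iff_match l j.toNat).mp h2
    rw [findA_loop_skip l i j.toNat acc (by omega) (fun m hm hmj => hmin m hm hmj)]
    rw [findA_loop, if_pos (show j.toNat + 1 < l.length by omega), if_pos ⟨hm1, hm2⟩]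
    have hcast : ((j.toNat : Nat) : Int) = j := Int.toNat_of_nonneg (by omega)
    rw [hcast]
    exact loops_eq l (j.toNat + 2) (acc ++ [j]) (by omega)
termination_by l.length + 1 - i
decreasing_by omega

-- the reference find-loop computes the offset-shifted index list
theorem pvFindRef_eq_idxs (l : List Char) (i : Nat) (acc : List Int) (hi : i ≤ l.length) :
    pvFindRef l i acc = acc ++ (pvIdxs (l.drop i)).map (· + (i : Int)) := by
  rw [pvFindRef, dif_pos hi]
  by_cases hj : PySem.Chars.findFrom l ['\n', '\n'] (i : Int) = -1
  · rw [dif_pos hj]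
    have hni : ¬ ['\n', '\n'] <:+: l.drop i :=
      (PySem.Chars.findFrom_natCast_eq_neg_one_iff l ['\n', '\n'] i hi).mp hj
    have hfd : PySem.Chars.find (l.drop i) ['\n', '\n'] = -1 :=
      (PySem.Chars.find_eq_neg_one_iff _ _).mpr hni
    rw [pvIdxs_eq]
    simp [hfd]
  · rw [dif_neg hj]
    have hnc := PySem.Chars.findFrom_natCast l ['\n', '\n'] i hi
    have hfd : PySem.Chars.find (l.drop i) ['\n', '\n'] ≠ -1 := by
      intro h; rw [hnc, if_pos h] at hj; exact hj rfl
    set f := PySem.Chars.find (l.drop i) ['\n', '\n'] with hfdef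
    have h0 : 0 ≤ f := pv_find_nonneg (l.drop i) hfd
    have hfb := pv_find_bound (l.drop i) hfd
    simp [List.length_drop] at hfb
    have hjval : PySem.Chars.findFrom l ['\n', '\n'] (i : Int) = (i : Int) + f := by
      rw [hnc, if_neg hfd]
    set j := PySem.Chars.findFrom l ['\n', '\n'] (i : Int) with hjdef
    have hjt : j.toNat = i + f.toNat := by omega
    have hbounds := pv_findFrom_bounds l i hi hj
    rw [pvFindRef_eq_idxs l (j.toNat + 2) (acc ++ [j]) (by omega)]
    rw [pvIdxs_eq (l.drop i), ← hfdef, if_neg hfd]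
    have hdd : l.drop (j.toNat + 2) = (l.drop i).drop (f.toNat + 2) := by
      rw [List.drop_drop]; congr 1; omega
    rw [hdd]
    simp [List.map_map]
    constructor
    · omega
    · intro a _
      omega
termination_by l.length + 1 - i
decreasing_by omega

-- ===== VERDICT (by name: the statement is the Claim_ definition above) =====
theorem find_all_index_spec : Claim_equal_find_all_index := by
  intro resp _
  unfold Spec_find_all_index find_all_index find_all_index_alt
  rw [loops_eq resp.toList 0 [] (by omega), pvFindRef_eq_idxs resp.toList 0 [] (by omega)]
  simp only [pv_splitOn_eq, PySem.List.slice_to_neg_one]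
  rw [pv_fold_eq resp.toList 0 []]
  simp
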